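-- pv_equiv track=rewrite | github.com/kp-z/stockradar-backend | feeds/stock_list.py | build_search_index
-- ===== SOURCE A (Python) =====
-- def build_search_index(stock_list: list[dict]) -> list[dict]:
--     """构建内存搜索索引（去重排序）。"""
--     seen: set[str] = set()
--     result: list[dict] = []
--     for s in stock_list:
--         code = s['code']
--         if code not in seen:
--             seen.add(code)
--             result.append(s)
--     result.sort(key=lambda x: x['code'])
--     return result
-- ===== SOURCE B (Python) =====
-- def build_search_index(stock_list: list[dict]) -> list[dict]:
--     """Selection-style dedup: repeatedly take the head and filter all later
--     records with the same code out of the remainder (no 'seen' set), then sort."""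
--     result: list[dict] = []
--     rest = stock_list
--     while rest:
--         head = rest[0]
--         result.append(head)
--         rest = [s for s in rest[1:] if s['code'] != head['code']]
--     result.sort(key=lambda s: s['code'])
--     return result
-- ===== Notes on version B (the rewrite author's own statement) =====
-- stated objective: alternative
-- what changed: B replaces A's seen-set accumulator with a selection-style loop that takes the head and filters every later record with the same code out of the remaining list, so no auxiliary set is kept; the kept elements are exactly A's first occurrences, then the same sort by code.
import Mathlib
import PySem

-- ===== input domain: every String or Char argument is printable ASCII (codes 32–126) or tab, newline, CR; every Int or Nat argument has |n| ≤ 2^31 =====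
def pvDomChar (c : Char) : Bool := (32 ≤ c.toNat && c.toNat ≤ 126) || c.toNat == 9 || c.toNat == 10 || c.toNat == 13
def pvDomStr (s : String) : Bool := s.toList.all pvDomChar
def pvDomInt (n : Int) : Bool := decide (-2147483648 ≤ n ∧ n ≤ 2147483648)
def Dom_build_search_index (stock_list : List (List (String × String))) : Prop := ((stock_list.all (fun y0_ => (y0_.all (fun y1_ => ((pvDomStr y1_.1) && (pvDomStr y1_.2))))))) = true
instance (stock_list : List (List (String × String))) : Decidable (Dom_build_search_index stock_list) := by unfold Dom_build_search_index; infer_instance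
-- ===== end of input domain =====

-- B replaces A's seen-set dedup with a selection-style loop (take the head, filter its code out of
-- the remainder, no auxiliary set), then the same sort by code; same return value on Pre_.

-- s['code']: Python dict subscript = first-match lookup; total under Pre_ (every dict has a 'code' key)
def pvCode (s : List (String × String)) : String := (PySem.Dict.mk s).getD "code" ""

-- ===== PORT A =====
def build_search_index (stock_list : List (List (String × String))) : List (List (String × String)) :=
  let st := stock_list.foldl
    (fun (st : PySem.Set String × List (List (String × String))) s =>
      let code := pvCode s
      if code ∉ st.1 then (st.1.add code, st.2 ++ [s]) else st)
    (PySem.Set.ofList [], [])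
  PySem.List.sorted st.2 pvCode false

-- ===== PORT B =====
-- B's while-loop: append the head to result, drop every later record sharing its code.
def pvSelect (result : List (List (String × String))) (rest : List (List (String × String))) :
    List (List (String × String)) :=
  match rest with
  | [] => result
  | head :: t =>
      pvSelect (result ++ [head]) (t.filter (fun s => decide (pvCode s ≠ pvCode head)))
termination_by rest.length
decreasing_by
  simp only [List.length_unattach, List.length_cons]
  exact Nat.lt_succ_of_le (le_trans (List.length_filter_le _ _)
    (le_of_eq (List.length_attach (l := t))))

def build_search_index_alt (stock_list : List (List (String × String))) : List (List (String × String)) :=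
  PySem.List.sorted (pvSelect [] stock_list) pvCode false

-- ===== PRECONDITION & SPEC =====
-- Pre_: every record has a 'code' key; on any other input Python A raises KeyError.
def Pre_build_search_index (stock_list : List (List (String × String))) : Prop :=
  (stock_list.all (fun s => (PySem.Dict.mk s).contains "code")) = true
instance (stock_list : List (List (String × String))) : Decidable (Pre_build_search_index stock_list) := by unfold Pre_build_search_index; infer_instance

def pvWitness_build_search_index : (List (List (String × String))) :=
  [[("code", "B"), ("name", "beta")], [("code", "A")], [("code", "B")]]

def Spec_build_search_index (stock_list : List (List (String × String))) (out : List (List (String × String))) : Prop := out = build_search_index_alt stock_list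
instance (stock_list : List (List (String × String))) (out : List (List (String × String))) : Decidable (Spec_build_search_index stock_list out) := by unfold Spec_build_search_index; infer_instance

-- ===== CLAIM (what is proved, stated in full; the proofs are below) =====
def Claim_equal_build_search_index : Prop := ∀ (stock_list : List (List (String × String))), Dom_build_search_index stock_list → Pre_build_search_index stock_list → Spec_build_search_index stock_list (build_search_index stock_list)

-- ===== LEMMAS AND PROOFS =====

-- recursive form of A's dedup loop
def pvDedup (seen : PySem.Set String) : List (List (String × String)) → List (List (String × String))
  | [] => []
  | s :: t => if pvCode s ∈ seen then pvDedup seen t else s :: pvDedup (seen.add (pvCode s)) t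

-- A's fold accumulates res ++ pvDedup seen xs
theorem foldl_dedup (xs : List (List (String × String))) (seen : PySem.Set String)
    (res : List (List (String × String))) :
    (xs.foldl
      (fun (st : PySem.Set String × List (List (String × String))) s =>
        let code := pvCode s
        if code ∉ st.1 then (st.1.add code, st.2 ++ [s]) else st)
      (seen, res)).2 = res ++ pvDedup seen xs := by
  induction xs generalizing seen res with
  | nil => simp [pvDedup]
  | cons s t ih =>
    by_cases h : pvCode s ∈ seen
    · have h' := ih seen res
      simp [pvDedup, h] at h' ⊢
      exact h'
    · have h' := ih (seen.add (pvCode s)) (res ++ [s])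
      simp [pvDedup, h] at h' ⊢
      simpa using h'

-- filtering out a code already in 'seen' does not change the dedup result
theorem dedup_filter (t : List (List (String × String))) (seen : PySem.Set String) (c : String)
    (hc : c ∈ seen) :
    pvDedup seen (t.filter (fun s => decide (pvCode s ≠ c))) = pvDedup seen t := by
  induction t generalizing seen with
  | nil => rfl
  | cons x r ih =>
    simp only [List.filter_cons]
    by_cases hx : pvCode x = c
    · have hb : decide (pvCode x ≠ c) = false := by simp [hx]
      rw [hb, if_neg Bool.false_ne_true, ih seen hc]
      have hmem : pvCode x ∈ seen := hx ▸ hc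
      simp only [pvDedup, if_pos hmem]
    · have hb : decide (pvCode x ≠ c) = true := by simp [hx]
      rw [hb, if_pos rfl]
      by_cases hs : pvCode x ∈ seen
      · simp only [pvDedup, if_pos hs]
        exact ih seen hc
      · simp only [pvDedup, if_neg hs]
        rw [ih (seen.add (pvCode x)) ((PySem.Set.mem_add _ _ _).mpr (Or.inl hc))]

-- B's selection loop computes A's seen-set dedup, provided no pending code is already seen
theorem select_eq_dedup (result rest : List (List (String × String))) :
    ∀ (seen : PySem.Set String),
      (∀ s ∈ rest, pvCode s ∉ seen) →
      pvSelect result rest = result ++ pvDedup seen rest := by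
  induction result, rest using pvSelect.induct with
  | case1 result => intro seen _; simp [pvSelect, pvDedup]
  | case2 result head t ih =>
    intro seen hinv
    have hhead : pvCode head ∉ seen := hinv head (by simp)
    have hinv' : ∀ s ∈ t.filter (fun s => decide (pvCode s ≠ pvCode head)),
        pvCode s ∉ seen.add (pvCode head) := by
      intro s hs
      have h1 : s ∈ t := List.mem_of_mem_filter hs
      have h2 : pvCode s ≠ pvCode head := by
        have := List.of_mem_filter hs; simpa using this
      rw [PySem.Set.mem_add]
      push Not
      exact ⟨hinv s (by simp [h1]), h2⟩
    have ih' := ih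
    rw [List.unattach_filter (g := fun s => decide (pvCode s ≠ pvCode head))
          (hf := fun x h => rfl),
        List.unattach_attach] at ih'
    have hstep := ih' (seen.add (pvCode head)) hinv'
    have hfd := dedup_filter t (seen.add (pvCode head)) (pvCode head)
      ((PySem.Set.mem_add _ _ _).mpr (Or.inr rfl))
    simp only [pvSelect]
    rw [hstep, hfd]
    simp only [pvDedup, if_neg hhead, List.append_assoc]
    rfl

-- ===== VERDICT (by name: the statement is the Claim_ definition above) =====
theorem build_search_index_spec : Claim_equal_build_search_index := by
  intro xs _ _
  show build_search_index xs = build_search_index_alt xs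
  have hA : build_search_index xs
      = PySem.List.sorted (pvDedup (PySem.Set.ofList []) xs) pvCode false := by
    show PySem.List.sorted
        (xs.foldl
          (fun (st : PySem.Set String × List (List (String × String))) s =>
            let code := pvCode s
            if code ∉ st.1 then (st.1.add code, st.2 ++ [s]) else st)
          (PySem.Set.ofList [], [])).2 pvCode false = _
    rw [foldl_dedup, List.nil_append]
  have hB : pvSelect [] xs = pvDedup (PySem.Set.ofList []) xs := by
    have := select_eq_dedup [] xs (PySem.Set.ofList []) (by simp [PySem.Set.ofList])
    simpa using this
  rw [hA, build_search_index_alt, hB]
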